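-- pv_equiv track=rewrite | github.com/Ela1009/Introduction_to_Programming | The function returns the string with the replaced letters.py | provjera
-- ===== SOURCE A (Python) =====
-- def provjera(string):
--     novi=""
--     for c in string:
--         if c=="O":
--             novi+="0"
--         if c=="I":
--             novi+="1"
--         if c=="E":
--             novi+="3"
--         elif c!="O" and c!="I" and c!="E":
--             novi+=c
--     return novi
-- ===== SOURCE B (Python) =====
-- def provjera(string):
--     return string.replace("O", "0").replace("I", "1").replace("E", "3")
-- ===== Notes on version B (the rewrite author's own statement) =====
-- stated objective: faster
-- what changed: Replaced the per-character Python loop with per-branch dispatch by a chain of three global str.replace substitutions done in C (safe since the digits 0/1/3 never occur in the search set O/I/E).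
import Mathlib
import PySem

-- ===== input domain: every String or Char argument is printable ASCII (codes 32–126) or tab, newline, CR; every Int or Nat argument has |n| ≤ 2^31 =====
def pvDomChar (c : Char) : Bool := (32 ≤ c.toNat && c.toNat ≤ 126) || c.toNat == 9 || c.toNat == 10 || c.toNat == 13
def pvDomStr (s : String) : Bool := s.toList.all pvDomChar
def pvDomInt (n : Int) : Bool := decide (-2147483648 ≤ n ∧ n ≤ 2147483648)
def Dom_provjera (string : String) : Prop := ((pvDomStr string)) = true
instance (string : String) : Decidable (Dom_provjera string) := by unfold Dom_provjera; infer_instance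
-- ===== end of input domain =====

-- B replaces A's per-character loop with a chain of three global str.replace substitutions (same result; the digits never collide with the searched letters).


-- ===== PORT A =====
def provjera (string : String) : String :=
  string.toList.foldl (fun novi c =>
    let novi := if c = 'O' then novi ++ "0" else novi
    let novi := if c = 'I' then novi ++ "1" else novi
    let novi := if c = 'E' then novi ++ "3"
                else if c ≠ 'O' ∧ c ≠ 'I' ∧ c ≠ 'E' then novi.push c else novi
    novi) ""

-- ===== PORT B =====
def provjera_alt (string : String) : String :=
  PySem.Str.replace (PySem.Str.replace (PySem.Str.replace string "O" "0") "I" "1") "E" "3"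

-- ===== PRECONDITION & SPEC =====
def Spec_provjera (string : String) (out : String) : Prop := out = provjera_alt string
instance (string : String) (out : String) : Decidable (Spec_provjera string out) := by unfold Spec_provjera; infer_instance

-- ===== CLAIM (what is proved, stated in full; the proofs are below) =====
def Claim_equal_provjera : Prop := ∀ (string : String), Dom_provjera string → Spec_provjera string (provjera string)

-- ===== LEMMAS AND PROOFS =====

-- single-char → single-char replacement is a map over the characters
theorem replace_go_single (o r : Char) : ∀ (l acc : List Char) (fuel : Nat), l.length ≤ fuel →
    PySem.Chars.replace.go [o] [r] fuel l acc
      = acc.reverse ++ l.map (fun c => if c = o then r else c) := by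
  intro l
  induction l with
  | nil =>
      intro acc fuel _
      cases fuel <;> simp [PySem.Chars.replace.go]
  | cons c t ih =>
      intro acc fuel h
      cases fuel with
      | zero => simp at h
      | succ f =>
          by_cases hc : c = o
          · have hpre : [o].isPrefixOf (c :: t) = true := by
              simp [List.isPrefixOf, hc]
            simp only [PySem.Chars.replace.go, hpre, if_pos]
            have hdrop : List.drop [o].length (c :: t) = t := rfl
            rw [hdrop, ih (([r].reverse) ++ acc) f (by simpa using Nat.le_of_succ_le_succ h)]
            simp [hc]
          · have hpre : [o].isPrefixOf (c :: t) = false := by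
              simp [List.isPrefixOf]
              exact fun h' => hc h'.symm
            simp only [PySem.Chars.replace.go, hpre, Bool.false_eq_true, if_false]
            rw [ih (c :: acc) f (by simpa using Nat.le_of_succ_le_succ h)]
            simp [hc]

theorem replace_single (o r : Char) (l : List Char) :
    PySem.Chars.replace l [o] [r] = l.map (fun c => if c = o then r else c) := by
  simp only [PySem.Chars.replace, List.isEmpty_cons, Bool.false_eq_true, if_false]
  simpa using replace_go_single o r l [] l.length le_rfl

def provStep (c : Char) : Char :=
  if c = 'O' then '0' else if c = 'I' then '1' else if c = 'E' then '3' else c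

-- A's loop body appends exactly one character per input character
theorem provjera_step_toList (s : String) (c : Char) :
    (let novi := if c = 'O' then s ++ "0" else s
     let novi := if c = 'I' then novi ++ "1" else novi
     let novi := if c = 'E' then novi ++ "3"
                 else if c ≠ 'O' ∧ c ≠ 'I' ∧ c ≠ 'E' then novi.push c else novi
     novi).toList = s.toList ++ [provStep c] := by
  unfold provStep
  by_cases h1 : c = 'O' <;> by_cases h2 : c = 'I' <;> by_cases h3 : c = 'E' <;>
    simp_all [String.toList_append, String.toList_push]

theorem provjera_foldl (l : List Char) : ∀ (s : String),
    (l.foldl (fun novi c =>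
      let novi := if c = 'O' then novi ++ "0" else novi
      let novi := if c = 'I' then novi ++ "1" else novi
      let novi := if c = 'E' then novi ++ "3"
                  else if c ≠ 'O' ∧ c ≠ 'I' ∧ c ≠ 'E' then novi.push c else novi
      novi) s).toList = s.toList ++ l.map provStep := by
  induction l with
  | nil => intro s; simp
  | cons c t ih =>
      intro s
      simp only [List.foldl_cons, List.map_cons, ih]
      rw [provjera_step_toList s c]
      simp

theorem provStep_comp (c : Char) :
    (if (if (if c = 'O' then '0' else c) = 'I' then '1' else (if c = 'O' then '0' else c)) = 'E'
      then '3'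
      else (if (if c = 'O' then '0' else c) = 'I' then '1' else (if c = 'O' then '0' else c)))
      = provStep c := by
  unfold provStep
  by_cases h1 : c = 'O' <;> by_cases h2 : c = 'I' <;> by_cases h3 : c = 'E' <;> simp_all

-- ===== VERDICT (by name: the statement is the Claim_ definition above) =====
theorem provjera_spec : Claim_equal_provjera := by
  intro s _
  unfold Spec_provjera provjera provjera_alt
  rw [← String.toList_inj]
  rw [provjera_foldl s.toList ""]
  simp only [PySem.Str.toList_replace]
  rw [show ("O" : String).toList = ['O'] from rfl, show ("0" : String).toList = ['0'] from rfl,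
      show ("I" : String).toList = ['I'] from rfl, show ("1" : String).toList = ['1'] from rfl,
      show ("E" : String).toList = ['E'] from rfl, show ("3" : String).toList = ['3'] from rfl]
  rw [replace_single, replace_single, replace_single]
  simp only [List.map_map]
  have := List.map_congr_left (l := s.toList) (fun c (_ : c ∈ s.toList) => provStep_comp c)
  rw [← this]
  simp
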